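-- pv_equiv track=rewrite | github.com/oaiwej/drnonsilentxml | drnonsilentxml/utils/ipcn_enumerate.py | ipcn_enumerate
-- ===== SOURCE A (Python) =====
-- from typing import TypeVar, Iterator, Tuple, Optional, Iterable
--
-- T = TypeVar('T')
--
-- def ipcn_enumerate(iterable: Iterable[T]) -> Iterator[Tuple[int, Optional[T], Optional[T], Optional[T]]]:
--     """
--     This is a generator that yields a tuple of the
--     - i: index of the current element
--     - p: previous element Or None
--     - c: current element
--     - n: next element Or None
--     """
--     p = None
--     c = None
--     n = None
--
--     # 空のイテラブルに対応するためのチェック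
--     iterator = iter(iterable)
--     try:
--         first = next(iterator)
--     except StopIteration:
--         # 空のイテラブルの場合は何もyieldせずに終了
--         return
--
--     # 最初の要素を処理
--     i = 0
--     n = first
--
--     # 残りの要素を処理
--     for i, e in enumerate(iterator, start=1):
--         p = c
--         c = n
--         n = e
--         if c is not None:
--             yield (i-1, p, c, e)
--
--     # 最後の要素を処理
--     p = c
--     c = n
--     n = None
--     yield (i, p, c, n)
-- ===== SOURCE B (Python) =====
-- def ipcn_enumerate(iterable):
--     items = list(iterable)
--     for j in range(len(items)):
--         prev = items[j - 1] if j > 0 else None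
--         nxt = items[j + 1] if j + 1 < len(items) else None
--         yield (j, prev, items[j], nxt)
-- ===== Notes on version B (the rewrite author's own statement) =====
-- stated objective: simpler
-- what changed: Replaces A's streaming three-variable lookahead window with materializing the list once and reading prev/curr/next by index; for int elements the interior yields and the final yield coincide with one uniform yield per index.
import Mathlib
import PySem

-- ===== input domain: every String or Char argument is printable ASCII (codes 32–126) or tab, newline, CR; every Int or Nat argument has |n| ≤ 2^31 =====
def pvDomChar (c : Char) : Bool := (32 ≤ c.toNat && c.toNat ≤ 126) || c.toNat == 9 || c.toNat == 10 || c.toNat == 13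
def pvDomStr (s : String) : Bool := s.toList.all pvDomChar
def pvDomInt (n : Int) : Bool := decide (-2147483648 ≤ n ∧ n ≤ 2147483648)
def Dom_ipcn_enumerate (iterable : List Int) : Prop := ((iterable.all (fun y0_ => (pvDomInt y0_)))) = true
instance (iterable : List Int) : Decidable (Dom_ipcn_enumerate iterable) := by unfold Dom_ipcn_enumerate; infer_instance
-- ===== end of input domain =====

-- B replaces A's streaming prev/curr/next sliding window by materializing the list and indexing; objective: simpler.

-- ===== PORT A =====
-- A's for-loop over the rest of the iterator, carrying (p, c, n, i); when the
-- list is exhausted it performs the final shift and yields once more.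
def ipcnLoop (p c n : Option Int) (i : Int) : List Int → List (Int × Option Int × Option Int × Option Int)
  | [] =>
      -- p = c; c = n; n = None; yield (i, p, c, n)
      [(i, c, n, none)]
  | e :: es =>
      let i' := i + 1
      let p' := c
      let c' := n
      let n' := some e
      (if c' ≠ none then [(i' - 1, p', c', some e)] else []) ++ ipcnLoop p' c' n' i' es

def ipcn_enumerate (iterable : List Int) : List (Int × Option Int × Option Int × Option Int) :=
  match iterable with
  | [] => []
  | first :: rest => ipcnLoop none none (some first) 0 rest

-- ===== PORT B =====
def ipcn_enumerate_alt (iterable : List Int) : List (Int × Option Int × Option Int × Option Int) :=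
  let items := iterable
  (List.range items.length).map (fun (j : Nat) =>
    ((j : Int),
     (if 0 < j then items[j - 1]? else none),
     items[j]?,
     (if j + 1 < items.length then items[j + 1]? else none)))

-- ===== PRECONDITION & SPEC =====
def Spec_ipcn_enumerate (iterable : List Int) (out : List (Int × Option Int × Option Int × Option Int)) : Prop := out = ipcn_enumerate_alt iterable
instance (iterable : List Int) (out : List (Int × Option Int × Option Int × Option Int)) : Decidable (Spec_ipcn_enumerate iterable out) := by unfold Spec_ipcn_enumerate; infer_instance

-- ===== CLAIM (what is proved, stated in full; the proofs are below) =====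
def Claim_equal_ipcn_enumerate : Prop := ∀ (iterable : List Int), Dom_ipcn_enumerate iterable → Spec_ipcn_enumerate iterable (ipcn_enumerate iterable)

-- ===== LEMMAS AND PROOFS =====

-- Common recursive characterization: ipcnSpec c i items = yields of the window walk
-- over items, with pending previous element c and starting index i.
def ipcnSpec (c : Option Int) (i : Int) : List Int → List (Int × Option Int × Option Int × Option Int)
  | [] => []
  | [x] => [(i, c, some x, none)]
  | x :: y :: rest => (i, c, some x, some y) :: ipcnSpec (some x) (i + 1) (y :: rest)

theorem ipcnLoop_eq_spec (L : List Int) : ∀ (p c : Option Int) (x : Int) (i : Int),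
    ipcnLoop p c (some x) i L = ipcnSpec c i (x :: L) := by
  induction L with
  | nil => intro p c x i; simp [ipcnLoop, ipcnSpec]
  | cons e es ih =>
      intro p c x i
      simp only [ipcnLoop, ipcnSpec, ih]
      norm_num
      simp

theorem spec_eq_map (items : List Int) : ∀ (c : Option Int) (i : Int),
    ipcnSpec c i items = (List.range items.length).map (fun (j : Nat) =>
      ((i + (j : Int)),
       (if 0 < j then items[j - 1]? else c),
       items[j]?,
       (if j + 1 < items.length then items[j + 1]? else none))) := by
  induction items with
  | nil => intro c i; simp [ipcnSpec]
  | cons x xs ih =>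
      intro c i
      cases xs with
      | nil => simp [ipcnSpec]
      | cons y ys =>
          simp only [ipcnSpec, ih (some x) (i + 1)]
          rw [List.length_cons (a := x), List.range_succ_eq_map, List.map_cons, List.map_map]
          rw [List.cons.injEq]
          constructor
          · simp
          · apply List.map_congr_left
            intro j _
            simp only [Function.comp]
            refine Prod.ext ?_ (Prod.ext ?_ (Prod.ext ?_ ?_))
            · push_cast; ring
            · cases j with
              | zero => simp
              | succ k => simp
            · simp
            · simp only [List.length_cons, Nat.succ_eq_add_one]
              have h : j + 1 + 1 < ys.length + 1 + 1 ↔ j + 1 < ys.length + 1 := by omega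
              rw [if_congr h rfl rfl]
              simp

-- ===== VERDICT (by name: the statement is the Claim_ definition above) =====
theorem ipcn_enumerate_spec : Claim_equal_ipcn_enumerate := by
  intro iterable _
  unfold Spec_ipcn_enumerate
  cases iterable with
  | nil => rfl
  | cons first rest =>
      show ipcnLoop none none (some first) 0 rest = ipcn_enumerate_alt (first :: rest)
      rw [ipcnLoop_eq_spec, spec_eq_map]
      simp only [ipcn_enumerate_alt]
      apply List.map_congr_left
      intro j _
      simp
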